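-- pv_equiv track=rewrite | github.com/leo-dower/arquivos_tamanho_localiza | ccopiascript - localiza em 2024 arquivos com mais de 1gb e duplicados - Copia.py | check_common_substring_9_or_more
-- ===== SOURCE A (Python) =====
-- def check_common_substring_9_or_more(file_name, file_name_list):
--     """Verifica se um nome de arquivo contém uma substring de 9 ou mais caracteres presente em outros arquivos"""
--     substrings = set()
--     length = len(file_name)
--
--     # Gera todas as substrings com 9 ou mais caracteres
--     for i in range(length):
--         for j in range(i + 9, length + 1):
--             substrings.add(file_name[i:j])
--
--     matching_files = [f for f in file_name_list if any(sub in f for sub in substrings)]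
--
--     return len(matching_files) > 1, matching_files
-- ===== SOURCE B (Python) =====
-- def check_common_substring_9_or_more(file_name, file_name_list):
--     """Verifica se um nome de arquivo contém uma substring de 9 ou mais caracteres presente em outros arquivos"""
--     win9 = {file_name[i:i + 9] for i in range(len(file_name) - 8)}
--     matching_files = [f for f in file_name_list
--                       if any(f[k:k + 9] in win9 for k in range(len(f) - 8))]
--     return len(matching_files) > 1, matching_files
-- ===== Notes on version B (the rewrite author's own statement) =====
-- stated objective: faster
-- what changed: Instead of enumerating all O(n^2) substrings of length >= 9 of file_name and searching each one in each file, B keeps only the n-8 length-9 windows of file_name in a set and slides a length-9 window over each candidate file, since a common substring of length >= 9 exists iff a common substring of length exactly 9 exists.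
import Mathlib
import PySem

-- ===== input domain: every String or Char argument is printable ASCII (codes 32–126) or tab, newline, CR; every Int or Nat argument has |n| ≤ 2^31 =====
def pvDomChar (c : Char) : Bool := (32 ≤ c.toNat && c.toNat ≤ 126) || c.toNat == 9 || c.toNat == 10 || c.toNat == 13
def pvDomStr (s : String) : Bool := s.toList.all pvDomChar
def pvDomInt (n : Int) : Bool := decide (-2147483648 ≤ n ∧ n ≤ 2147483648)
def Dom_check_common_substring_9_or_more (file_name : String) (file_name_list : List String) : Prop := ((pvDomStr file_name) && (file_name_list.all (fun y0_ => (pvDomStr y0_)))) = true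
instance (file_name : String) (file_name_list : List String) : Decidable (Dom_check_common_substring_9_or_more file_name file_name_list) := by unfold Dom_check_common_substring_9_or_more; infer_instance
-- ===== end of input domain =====

-- B replaces A's set of ALL ≥9-char substrings of file_name by the set of its length-9 windows
-- and slides a length-9 window over each candidate file (faster; same return value).

-- ===== PORT A =====
-- the set built by A's two nested 'for' loops (substrings of length ≥ 9)
def pvSubsA (file_name : String) : PySem.Set String :=
  (PySem.List.pyRange 0 (PySem.Str.len file_name) 1).foldl (fun s i =>
    (PySem.List.pyRange (i + 9) (PySem.Str.len file_name + 1) 1).foldl (fun s j =>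
      PySem.Set.add s (PySem.Str.slice file_name (some i) (some j))) s) PySem.Set.empty

def check_common_substring_9_or_more (file_name : String) (file_name_list : List String) : Bool × List String :=
  let substrings := pvSubsA file_name
  let matching_files := file_name_list.filter (fun f => substrings.any (fun sub => PySem.Str.isIn sub f))
  (decide ((matching_files.length : Int) > 1), matching_files)

-- ===== PORT B =====
-- the set comprehension of B: all length-9 windows of file_name
def pvWin9 (file_name : String) : PySem.Set String :=
  PySem.Set.ofList ((PySem.List.pyRange 0 (PySem.Str.len file_name - 8) 1).map
    (fun i => PySem.Str.slice file_name (some i) (some (i + 9))))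

def check_common_substring_9_or_more_alt (file_name : String) (file_name_list : List String) : Bool × List String :=
  let win9 := pvWin9 file_name
  let matching_files := file_name_list.filter (fun f =>
    (PySem.List.pyRange 0 (PySem.Str.len f - 8) 1).any
      (fun k => PySem.Set.contains win9 (PySem.Str.slice f (some k) (some (k + 9)))))
  (decide ((matching_files.length : Int) > 1), matching_files)

-- ===== PRECONDITION & SPEC =====
def Spec_check_common_substring_9_or_more (file_name : String) (file_name_list : List String) (out : Bool × List String) : Prop := out = check_common_substring_9_or_more_alt file_name file_name_list
instance (file_name : String) (file_name_list : List String) (out : Bool × List String) : Decidable (Spec_check_common_substring_9_or_more file_name file_name_list out) := by unfold Spec_check_common_substring_9_or_more; infer_instance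

-- ===== CLAIM (what is proved, stated in full; the proofs are below) =====
def Claim_equal_check_common_substring_9_or_more : Prop := ∀ (file_name : String) (file_name_list : List String), Dom_check_common_substring_9_or_more file_name file_name_list → Spec_check_common_substring_9_or_more file_name file_name_list (check_common_substring_9_or_more file_name file_name_list)

-- ===== LEMMAS AND PROOFS =====

-- membership in the set built by A's two nested loops
lemma mem_foldl_foldl_add {α β γ : Type} [BEq γ] [LawfulBEq γ]
    (L : List α) (M : α → List β) (f : α → β → γ) (s0 : PySem.Set γ) (y : γ) :
    y ∈ L.foldl (fun s i => (M i).foldl (fun s j => PySem.Set.add s (f i j)) s) s0 ↔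
      y ∈ s0 ∨ ∃ i ∈ L, ∃ j ∈ M i, y = f i j := by
  induction L generalizing s0 with
  | nil => simp
  | cons a L ih =>
    simp only [List.foldl_cons, ih, PySem.Set.mem_foldl_add, List.mem_cons]
    constructor
    · rintro (⟨h | ⟨j, hj, rfl⟩⟩ | ⟨i, hi, j, hj, rfl⟩)
      · exact Or.inl h
      · exact Or.inr ⟨a, Or.inl rfl, j, hj, rfl⟩
      · exact Or.inr ⟨i, Or.inr hi, j, hj, rfl⟩
    · rintro (h | ⟨i, (rfl | hi), j, hj, rfl⟩)
      · exact Or.inl (Or.inl h)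
      · exact Or.inl (Or.inr ⟨j, hj, rfl⟩)
      · exact Or.inr ⟨i, hi, j, hj, rfl⟩

-- the combinatorial heart: fs contains a ≥9-char substring of cs iff some length-9
-- window of fs equals some length-9 window of cs
lemma core (cs fs : List Char) :
    (∃ a b : Nat, a + 9 ≤ b ∧ b ≤ cs.length ∧ (cs.drop a).take (b - a) <:+: fs)
    ↔ (∃ k a : Nat, k + 9 ≤ fs.length ∧ a + 9 ≤ cs.length ∧
        (cs.drop a).take 9 = (fs.drop k).take 9) := by
  constructor
  · rintro ⟨a, b, hab, hb, hinf⟩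
    have hlen9 : ((cs.drop a).take 9).length = 9 := by
      simp [List.length_take, List.length_drop]; omega
    have hpre : (cs.drop a).take 9 <+: (cs.drop a).take (b - a) := by
      have : ((cs.drop a).take (b - a)).take 9 = (cs.drop a).take 9 := by
        rw [List.take_take]; congr 1; omega
      exact this ▸ List.take_prefix 9 _
    have hw : (cs.drop a).take 9 <:+: fs := hpre.isInfix.trans hinf
    obtain ⟨s, t, hst⟩ := hw
    refine ⟨s.length, a, ?_, by omega, ?_⟩
    · have := congrArg List.length hst
      simp at this; omega
    · have hdrop : fs.drop s.length = (cs.drop a).take 9 ++ t := by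
        rw [← hst, List.append_assoc, List.drop_left]
      rw [hdrop, List.take_left' hlen9]
  · rintro ⟨k, a, hk, ha, heq⟩
    refine ⟨a, a + 9, le_refl _, ha, ?_⟩
    have h9 : a + 9 - a = 9 := by omega
    rw [h9, heq]
    exact (List.take_prefix 9 (fs.drop k)).isInfix.trans (List.drop_suffix k fs).isInfix

-- the two per-file predicates agree
lemma pred_eq (file_name f : String) :
    (pvSubsA file_name).any (fun sub => PySem.Str.isIn sub f)
    = (PySem.List.pyRange 0 (PySem.Str.len f - 8) 1).any
        (fun k => PySem.Set.contains (pvWin9 file_name) (PySem.Str.slice f (some k) (some (k + 9)))) := by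
  rw [Bool.eq_iff_iff]
  simp only [List.any_eq_true, pvSubsA, pvWin9, mem_foldl_foldl_add,
    PySem.Set.contains_iff, PySem.Set.mem_ofList, List.mem_map,
    PySem.List.mem_pyRange_one, PySem.Str.isIn_iff_infix, PySem.Str.len_eq]
  constructor
  · rintro ⟨sub, (h | ⟨i, ⟨hi0, hiL⟩, j, ⟨hij, hjL⟩, rfl⟩), hin⟩
    · simp [PySem.Set.empty] at h
    · rw [PySem.Str.toList_slice, PySem.Chars.slice_eq_listSlice,
        PySem.List.slice_toNat _ hi0 (by omega)] at hin
      have : ∃ k a : Nat, k + 9 ≤ f.toList.length ∧ a + 9 ≤ file_name.toList.length ∧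
          (file_name.toList.drop a).take 9 = (f.toList.drop k).take 9 :=
        (core file_name.toList f.toList).mp ⟨i.toNat, j.toNat, by omega, by omega, hin⟩
      obtain ⟨k, a, hk, ha, heq⟩ := this
      refine ⟨(k : Int), ⟨by omega, by omega⟩, ⟨(a : Int), ⟨by omega, by omega⟩, ?_⟩⟩
      apply String.ext
      rw [PySem.Str.toList_slice, PySem.Str.toList_slice,
        PySem.Chars.slice_eq_listSlice, PySem.Chars.slice_eq_listSlice,
        PySem.List.slice_toNat _ (by omega : (0:Int) ≤ (a : Int)) (by omega),
        PySem.List.slice_toNat _ (by omega : (0:Int) ≤ (k : Int)) (by omega)]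
      have e1 : ((a : Int) + 9).toNat - ((a : Int)).toNat = 9 := by omega
      have e2 : ((k : Int) + 9).toNat - ((k : Int)).toNat = 9 := by omega
      rw [e1, e2, Int.toNat_natCast, Int.toNat_natCast, heq]
  · rintro ⟨k, ⟨hk0, hkM⟩, i, ⟨hi0, hiL⟩, heq⟩
    have heq' : (file_name.toList.drop i.toNat).take 9 = (f.toList.drop k.toNat).take 9 := by
      have := congrArg String.toList heq
      rw [PySem.Str.toList_slice, PySem.Str.toList_slice,
        PySem.Chars.slice_eq_listSlice, PySem.Chars.slice_eq_listSlice,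
        PySem.List.slice_toNat _ hi0 (by omega), PySem.List.slice_toNat _ hk0 (by omega)] at this
      have h1 : (i + 9).toNat - i.toNat = 9 := by omega
      have h2 : (k + 9).toNat - k.toNat = 9 := by omega
      rwa [h1, h2] at this
    obtain ⟨a, b, hab, hb, hinf⟩ := (core file_name.toList f.toList).mpr
      ⟨k.toNat, i.toNat, by omega, by omega, heq'⟩
    refine ⟨PySem.Str.slice file_name (some (a : Int)) (some (b : Int)),
      Or.inr ⟨(a : Int), ⟨by omega, by omega⟩, (b : Int), ⟨by omega, by omega⟩, rfl⟩, ?_⟩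
    rw [PySem.Str.toList_slice, PySem.Chars.slice_eq_listSlice, PySem.List.slice_natCast]
    exact hinf

-- ===== VERDICT (by name: the statement is the Claim_ definition above) =====
theorem check_common_substring_9_or_more_spec : Claim_equal_check_common_substring_9_or_more := by
  intro file_name file_name_list _
  unfold Spec_check_common_substring_9_or_more
  unfold check_common_substring_9_or_more check_common_substring_9_or_more_alt
  have hf : file_name_list.filter (fun f => (pvSubsA file_name).any (fun sub => PySem.Str.isIn sub f))
      = file_name_list.filter (fun f =>
          (PySem.List.pyRange 0 (PySem.Str.len f - 8) 1).any
            (fun k => PySem.Set.contains (pvWin9 file_name) (PySem.Str.slice f (some k) (some (k + 9))))) :=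
    List.filter_congr (fun f _ => pred_eq file_name f)
  simp only [hf]
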